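-- pv_equiv track=rewrite | github.com/dsp-uga/Canady | independent neurons.py | independent_neuron
-- ===== SOURCE A (Python) =====
-- def all_coordinates(li):
--     """Get all coordinates and return a set of tuples"""
--     new_li = []
--     for l in li:
--         for item in l:
--             new_li.append(item)
--     return set(new_li)
--
-- def not_adjacent(tu,rest_coor):
--     """Check if tuple tu is not adjacent with any tuple in set rest_coor
--         return true if it is not adjacent"""
--     not_ad = False
--     if (tu[0]+1,tu[1]) not in rest_coor \
--             and (tu[0]-1, tu[1]) not in rest_coor\
--             and (tu[0]+1, tu[1]+1) not in rest_coor \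
--             and (tu[0]-1, tu[1]+1) not in rest_coor\
--             and (tu[0],tu[1]+1) not in rest_coor \
--             and (tu[0], tu[1]-1) not in rest_coor\
--             and (tu[0]+1, tu[1]-1) not in rest_coor \
--             and (tu[0]-1, tu[1]-1) not in rest_coor:
--                 not_ad = True
--
--     return not_ad
--
-- def independent_neuron(li):
--     """Remove overlapping and adjacent pixels"""
--     new_li = []
--     all_coor = all_coordinates(li)
--     for i in range(len(li)):
--         rest_coor = all_coor - set(li[i])
--         new_sm_li = []
--         for item in li[i]:
--             if item not in rest_coor and not_adjacent(item,rest_coor):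
--                 new_sm_li.append(item)
--         new_li.append(new_sm_li)
--     return new_li
-- ===== SOURCE B (Python) =====
-- OFFS = [(1, 0), (-1, 0), (1, 1), (-1, 1), (0, 1), (0, -1), (1, -1), (-1, -1)]
--
-- def independent_neuron(li):
--     """Remove overlapping and adjacent pixels (inverted-adjacency-index version)."""
--     # one pass over all pixels: index[c] = set of global pixels whose 8-neighbourhood contains c
--     index = {}
--     for l in li:
--         for (x, y) in l:
--             for (dx, dy) in OFFS:
--                 index.setdefault((x + dx, y + dy), set()).add((x, y))
--     # keep a pixel iff every global pixel adjacent to it belongs to its own neuron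
--     out = []
--     for l in li:
--         own = set(l)
--         out.append([p for p in l if index.get(p, set()) <= own])
--     return out
-- ===== Notes on version B (the rewrite author's own statement) =====
-- stated objective: alternative
-- what changed: Instead of recomputing rest_coor = all_coordinates - set(li[i]) per neuron and probing 8 neighbours of each pixel against it, B builds one inverted adjacency index (coordinate -> set of global pixels adjacent to it) in a single pass over all pixels and keeps a pixel iff its index entry is a subset of its own neuron's pixel set.
import Mathlib
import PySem

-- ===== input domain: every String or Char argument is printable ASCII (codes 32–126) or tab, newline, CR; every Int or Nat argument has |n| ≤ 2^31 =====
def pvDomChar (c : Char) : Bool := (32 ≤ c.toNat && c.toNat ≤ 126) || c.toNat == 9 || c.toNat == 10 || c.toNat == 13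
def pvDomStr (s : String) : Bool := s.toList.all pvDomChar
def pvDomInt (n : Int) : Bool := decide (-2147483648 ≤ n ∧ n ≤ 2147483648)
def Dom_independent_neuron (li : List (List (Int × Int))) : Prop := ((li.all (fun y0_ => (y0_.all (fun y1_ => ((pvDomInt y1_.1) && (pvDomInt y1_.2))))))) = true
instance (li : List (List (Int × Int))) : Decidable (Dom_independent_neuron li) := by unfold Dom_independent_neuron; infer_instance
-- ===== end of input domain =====

-- B replaces A's per-neuron set difference + 8-neighbour probes with one inverted
-- adjacency index built in a single pass, then a subset test per pixel (alternative decomposition).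


-- ===== PORT A =====
def all_coordinates (li : List (List (Int × Int))) : PySem.Set (Int × Int) :=
  PySem.Set.ofList (li.foldl (fun new_li l => l.foldl (fun acc item => acc ++ [item]) new_li) [])

def not_adjacent (tu : Int × Int) (rest_coor : PySem.Set (Int × Int)) : Bool :=
  let not_ad := false
  if !(PySem.Set.contains rest_coor (tu.1 + 1, tu.2)) &&
     !(PySem.Set.contains rest_coor (tu.1 - 1, tu.2)) &&
     !(PySem.Set.contains rest_coor (tu.1 + 1, tu.2 + 1)) &&
     !(PySem.Set.contains rest_coor (tu.1 - 1, tu.2 + 1)) &&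
     !(PySem.Set.contains rest_coor (tu.1, tu.2 + 1)) &&
     !(PySem.Set.contains rest_coor (tu.1, tu.2 - 1)) &&
     !(PySem.Set.contains rest_coor (tu.1 + 1, tu.2 - 1)) &&
     !(PySem.Set.contains rest_coor (tu.1 - 1, tu.2 - 1)) then
    true
  else
    not_ad

def independent_neuron (li : List (List (Int × Int))) : List (List (Int × Int)) :=
  let all_coor := all_coordinates li
  (PySem.List.pyRange 0 (li.length : Int) 1).foldl
    (fun new_li i =>
      let cur := PySem.List.pyGetD li i []
      let rest_coor := PySem.Set.diff all_coor (PySem.Set.ofList cur)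
      let new_sm_li := cur.foldl
        (fun acc item =>
          if !(PySem.Set.contains rest_coor item) && not_adjacent item rest_coor then
            acc ++ [item]
          else acc) []
      new_li ++ [new_sm_li]) []

-- ===== PORT B =====
def offs : List (Int × Int) := [(1, 0), (-1, 0), (1, 1), (-1, 1), (0, 1), (0, -1), (1, -1), (-1, -1)]

-- index.setdefault((x+dx, y+dy), set()).add((x, y))  ==  modify key ∅ (·.add q)
def buildIndex (li : List (List (Int × Int))) : PySem.Dict (Int × Int) (PySem.Set (Int × Int)) :=
  li.foldl
    (fun idx l =>
      l.foldl
        (fun idx q =>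
          offs.foldl
            (fun idx o =>
              idx.modify (q.1 + o.1, q.2 + o.2) PySem.Set.empty (fun s => PySem.Set.add s q))
            idx)
        idx)
    PySem.Dict.empty

def independent_neuron_alt (li : List (List (Int × Int))) : List (List (Int × Int)) :=
  let index := buildIndex li
  li.foldl
    (fun out l =>
      let own := PySem.Set.ofList l
      out ++ [l.filter (fun p => PySem.Set.issubset (index.getD p PySem.Set.empty) own)])
    []

-- ===== PRECONDITION & SPEC =====
def Spec_independent_neuron (li : List (List (Int × Int))) (out : List (List (Int × Int))) : Prop := out = independent_neuron_alt li
instance (li : List (List (Int × Int))) (out : List (List (Int × Int))) : Decidable (Spec_independent_neuron li out) := by unfold Spec_independent_neuron; infer_instance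

-- ===== CLAIM (what is proved, stated in full; the proofs are below) =====
def Claim_equal_independent_neuron : Prop := ∀ (li : List (List (Int × Int))), Dom_independent_neuron li → Spec_independent_neuron li (independent_neuron li)

-- ===== LEMMAS AND PROOFS =====

-- membership in the set stored at key c after one pixel's offset loop
theorem getD_offsFold (os : List (Int × Int)) (q c r : Int × Int)
    (d : PySem.Dict (Int × Int) (PySem.Set (Int × Int))) :
    r ∈ (os.foldl (fun idx o =>
          idx.modify (q.1 + o.1, q.2 + o.2) PySem.Set.empty (fun s => PySem.Set.add s q)) d).getD c PySem.Set.empty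
      ↔ r ∈ d.getD c PySem.Set.empty ∨ (r = q ∧ ∃ o ∈ os, c = (q.1 + o.1, q.2 + o.2)) := by
  induction os generalizing d with
  | nil => simp
  | cons o os ih =>
    simp only [List.foldl_cons, ih, PySem.Dict.getD_modify]
    by_cases h : c = (q.1 + o.1, q.2 + o.2)
    · simp only [if_pos h, PySem.Set.mem_add, List.mem_cons]
      aesop
    · simp only [if_neg h, List.mem_cons]
      aesop

theorem getD_pixFold (ps : List (Int × Int)) (c r : Int × Int)
    (d : PySem.Dict (Int × Int) (PySem.Set (Int × Int))) :
    r ∈ (ps.foldl (fun idx q =>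
          offs.foldl (fun idx o =>
            idx.modify (q.1 + o.1, q.2 + o.2) PySem.Set.empty (fun s => PySem.Set.add s q)) idx) d).getD c PySem.Set.empty
      ↔ r ∈ d.getD c PySem.Set.empty ∨ (r ∈ ps ∧ ∃ o ∈ offs, c = (r.1 + o.1, r.2 + o.2)) := by
  induction ps generalizing d with
  | nil => simp
  | cons q ps ih =>
    simp only [List.foldl_cons, ih, getD_offsFold, List.mem_cons]
    aesop

theorem getD_buildIndex (li : List (List (Int × Int))) (c r : Int × Int) :
    r ∈ (buildIndex li).getD c PySem.Set.empty
      ↔ (∃ l ∈ li, r ∈ l) ∧ ∃ o ∈ offs, c = (r.1 + o.1, r.2 + o.2) := by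
  unfold buildIndex
  suffices h : ∀ d : PySem.Dict (Int × Int) (PySem.Set (Int × Int)),
      r ∈ (li.foldl (fun idx l =>
            l.foldl (fun idx q =>
              offs.foldl (fun idx o =>
                idx.modify (q.1 + o.1, q.2 + o.2) PySem.Set.empty (fun s => PySem.Set.add s q)) idx) idx) d).getD c PySem.Set.empty
        ↔ r ∈ d.getD c PySem.Set.empty ∨ ((∃ l ∈ li, r ∈ l) ∧ ∃ o ∈ offs, c = (r.1 + o.1, r.2 + o.2)) by
    rw [h]; simp
  intro d
  induction li generalizing d with
  | nil => simp
  | cons l li ih =>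
    simp only [List.foldl_cons, ih, getD_pixFold, List.mem_cons]
    aesop

-- the flattened coordinate list A builds
theorem flat_eq (li : List (List (Int × Int))) (acc : List (Int × Int)) :
    li.foldl (fun new_li l => l.foldl (fun a item => a ++ [item]) new_li) acc = acc ++ li.flatten := by
  induction li generalizing acc with
  | nil => simp
  | cons l li ih =>
    simp only [List.foldl_cons, ih]
    have h : ∀ (a : List (Int × Int)), l.foldl (fun a item => a ++ [item]) a = a ++ l := by
      intro a
      induction l generalizing a with
      | nil => simp
      | cons x l ihl => simp [ihl]
    rw [h, List.append_assoc, List.flatten_cons]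

theorem mem_all_coordinates (li : List (List (Int × Int))) (r : Int × Int) :
    r ∈ all_coordinates li ↔ ∃ l ∈ li, r ∈ l := by
  unfold all_coordinates
  rw [PySem.Set.mem_ofList, flat_eq]
  simp

theorem neg_mem_offs (o : Int × Int) (h : o ∈ offs) : (-o.1, -o.2) ∈ offs := by
  fin_cases h <;> decide

theorem not_adjacent_iff (tu : Int × Int) (rest : PySem.Set (Int × Int)) :
    not_adjacent tu rest = true ↔ ∀ o ∈ offs, (tu.1 + o.1, tu.2 + o.2) ∉ rest := by
  simp only [not_adjacent, offs, Bool.and_eq_true, Bool.not_eq_true',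
    PySem.Set.contains_eq_listContains, List.contains_eq_mem, decide_eq_false_iff_not,
    List.forall_mem_cons, List.not_mem_nil, false_implies]
  norm_num [sub_eq_add_neg]
  tauto

-- per-pixel predicate equivalence (p a pixel of neuron l)
theorem pred_iff (li : List (List (Int × Int))) (l : List (Int × Int)) (p : Int × Int) (hp : p ∈ l) :
    (!(PySem.Set.contains (PySem.Set.diff (all_coordinates li) (PySem.Set.ofList l)) p)
       && not_adjacent p (PySem.Set.diff (all_coordinates li) (PySem.Set.ofList l))) = true
    ↔ PySem.Set.issubset ((buildIndex li).getD p PySem.Set.empty) (PySem.Set.ofList l) = true := by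
  have hG : ∀ r : Int × Int,
      r ∈ PySem.Set.diff (all_coordinates li) (PySem.Set.ofList l) ↔ (∃ l' ∈ li, r ∈ l') ∧ r ∉ l := by
    intro r
    rw [PySem.Set.mem_diff, mem_all_coordinates, PySem.Set.mem_ofList]
  rw [PySem.Set.issubset_iff, Bool.and_eq_true, not_adjacent_iff]
  constructor
  · rintro ⟨-, hadj⟩ r hr
    rw [getD_buildIndex] at hr
    obtain ⟨hGl, o, ho, hc⟩ := hr
    rw [PySem.Set.mem_ofList]
    by_contra hrl
    have hmem : r ∈ PySem.Set.diff (all_coordinates li) (PySem.Set.ofList l) := (hG r).mpr ⟨hGl, hrl⟩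
    have hno := neg_mem_offs o ho
    have hkey := hadj _ hno
    apply hkey
    have he : (p.1 + -o.1, p.2 + -o.2) = r := by
      obtain ⟨r1, r2⟩ := r
      obtain ⟨p1, p2⟩ := p
      simp only [Prod.mk.injEq] at hc ⊢
      omega
    rwa [he]
  · intro h
    constructor
    · simp only [Bool.not_eq_true', PySem.Set.contains_eq_listContains, List.contains_eq_mem,
        decide_eq_false_iff_not]
      intro hmem
      exact ((hG p).mp hmem).2 hp
    · intro o ho hmem
      obtain ⟨hGl, hnl⟩ := (hG _).mp hmem
      have hin : (p.1 + o.1, p.2 + o.2) ∈ (buildIndex li).getD p PySem.Set.empty := by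
        rw [getD_buildIndex]
        refine ⟨hGl, (-o.1, -o.2), neg_mem_offs o ho, ?_⟩
        obtain ⟨p1, p2⟩ := p
        simp only [Prod.mk.injEq]
        omega
      have hmeml := h _ hin
      rw [PySem.Set.mem_ofList] at hmeml
      exact hnl hmeml

theorem inner_eq (li : List (List (Int × Int))) (l : List (Int × Int)) :
    l.foldl
      (fun acc item =>
        if !(PySem.Set.contains (PySem.Set.diff (all_coordinates li) (PySem.Set.ofList l)) item)
            && not_adjacent item (PySem.Set.diff (all_coordinates li) (PySem.Set.ofList l)) then
          acc ++ [item]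
        else acc) []
    = l.filter (fun p => PySem.Set.issubset ((buildIndex li).getD p PySem.Set.empty) (PySem.Set.ofList l)) := by
  rw [PySem.List.foldl_append_if_eq_filter]
  simp only [List.nil_append]
  apply List.filter_congr
  intro p hp
  have hiff := pred_iff li l p hp
  cases hb : PySem.Set.issubset ((buildIndex li).getD p PySem.Set.empty) (PySem.Set.ofList l) with
  | false =>
    simp only [hb] at hiff
    simpa using hiff
  | true =>
    simp only [hb, iff_true] at hiff
    exact hiff

-- ===== VERDICT (by name: the statement is the Claim_ definition above) =====
theorem independent_neuron_spec : Claim_equal_independent_neuron := by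
  intro li _
  show independent_neuron li = independent_neuron_alt li
  unfold independent_neuron independent_neuron_alt
  refine Eq.trans
    (PySem.List.foldl_pyRange_zero_pyGetD' li []
      (fun new_li cur =>
        new_li ++ [cur.foldl
          (fun acc item =>
            if !(PySem.Set.contains (PySem.Set.diff (all_coordinates li) (PySem.Set.ofList cur)) item)
                && not_adjacent item (PySem.Set.diff (all_coordinates li) (PySem.Set.ofList cur)) then
              acc ++ [item]
            else acc) []])
      []) ?_
  refine PySem.List.foldl_congr_mem _ _ _ _ ?_
  intro acc l _
  rw [inner_eq li l]
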